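-- pv_equiv track=rewrite | github.com/joaopmjm/LogicaDaComputacao2021.2 | Calculator.py | RemoveSpaces
-- ===== SOURCE A (Python) =====
-- def RemoveSpaces(argument):
--     SPACE = " "
--     while argument[0] == SPACE:
--         argument = argument[1:len(argument)]
--     while argument[-1] == SPACE:
--         argument = argument[0:len(argument)-1]
--     ops = {
--         0:['+','-'],
--         1:['*','/','^']
--     }
--     while argument.find(SPACE*2, 0, len(argument)) != -1:
--         argument = argument.replace(SPACE*2, SPACE)
--
--     c = 0
--     while c < len(argument):
--         if argument[c] == SPACE:
--             if ((argument[c-1] in ops[0] and argument[c+1] in ops[0]) or \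
--             (argument[c-1] in ops[1] and argument[c+1] in ops[1])):
--                 argument = argument[0 : c :] + argument[c + 1 : :]
--         c += 1
--     return argument
-- ===== SOURCE B (Python) =====
-- def RemoveSpaces(argument):
--     OPS0 = {'+', '-'}
--     OPS1 = {'*', '/', '^'}
--     tokens = [t for t in argument.split(' ') if t]
--     if not tokens:
--         return ''
--     result = tokens[0]
--     for tok in tokens[1:]:
--         if (result[-1] in OPS0 and tok[0] in OPS0) or \
--            (result[-1] in OPS1 and tok[0] in OPS1):
--             result += tok
--         else:
--             result += ' ' + tok
--     return result
-- ===== Notes on version B (the rewrite author's own statement) =====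
-- stated objective: faster
-- what changed: Replaced A's four destructive rescan phases (strip loops, repeated global replace of double spaces, index-walk with in-place deletions) by one split into non-empty tokens followed by a single fold that joins adjacent tokens with no separator when their boundary characters are in the same operator class.
import Mathlib
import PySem

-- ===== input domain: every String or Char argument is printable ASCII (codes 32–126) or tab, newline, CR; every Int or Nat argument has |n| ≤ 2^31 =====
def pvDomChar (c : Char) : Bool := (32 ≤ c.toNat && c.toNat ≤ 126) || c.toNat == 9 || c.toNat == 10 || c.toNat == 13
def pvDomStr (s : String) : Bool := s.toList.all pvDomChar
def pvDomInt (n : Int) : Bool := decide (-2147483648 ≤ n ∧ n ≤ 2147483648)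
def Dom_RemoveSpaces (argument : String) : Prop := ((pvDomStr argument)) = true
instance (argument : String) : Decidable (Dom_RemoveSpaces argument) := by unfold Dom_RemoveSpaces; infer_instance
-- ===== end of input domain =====

-- B replaces A's four destructive rescan phases by one split into non-empty tokens and a single
-- fold over token gaps (same return value on Pre_; objective: faster, measured).


-- ===== PORT A =====
-- ops[0] and ops[1] membership tests
def pvInOps0 (c : Char) : Bool := c = '+' || c = '-'
def pvInOps1 (c : Char) : Bool := c = '*' || c = '/' || c = '^'

-- the condition of A's third phase; `none` is where Python's indexing would raise (unreached under Pre_)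
def pvMatch : Option Char → Option Char → Bool
  | some a, some b => (pvInOps0 a && pvInOps0 b) || (pvInOps1 a && pvInOps1 b)
  | _, _ => false

-- `while argument[0] == SPACE: argument = argument[1:len(argument)]`; [] is where Python raises IndexError (excluded by Pre_)
def pvStripL : List Char → List Char
  | [] => []
  | c :: rest => if c = ' ' then pvStripL rest else c :: rest

-- `while argument[-1] == SPACE: argument = argument[0:len(argument)-1]`
def pvStripR (s : List Char) : List Char :=
  if h : PySem.List.pyGet? s (-1) = some ' ' then
    pvStripR s.dropLast
  else s
termination_by s.length
decreasing_by
  have hne : s ≠ [] := by intro he; subst he; simp [PySem.List.pyGet?] at h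
  have : 0 < s.length := List.length_pos_iff.mpr hne
  simp [List.length_dropLast]; omega

-- one pass of `argument.replace(SPACE*2, SPACE)`: hand port of str.replace for this two-space
-- pattern (leftmost, non-overlapping), exact for old = "  ", new = " "
def pvReplDbl : List Char → List Char
  | ' ' :: ' ' :: rest => ' ' :: pvReplDbl rest
  | c :: rest => c :: pvReplDbl rest
  | [] => []

theorem pvReplDbl_length_le (l : List Char) : (pvReplDbl l).length ≤ l.length := by
  induction l using pvReplDbl.induct <;> simp [pvReplDbl] <;> omega

theorem pvReplDbl_length_lt (l : List Char) (h : [' ', ' '] <:+: l) :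
    (pvReplDbl l).length < l.length := by
  induction l using pvReplDbl.induct with
  | case1 rest ih =>
      have := pvReplDbl_length_le rest
      simp [pvReplDbl]; omega
  | case2 c rest hnot ih =>
      rcases (List.infix_cons_iff).mp h with hp | hi
      · exfalso
        rcases hp with ⟨u, hu⟩
        cases rest with
        | nil => simp at hu
        | cons d r =>
            simp at hu
            exact hnot r hu.1.symm (by rw [← hu.2.1])
      · have hc : pvReplDbl (c :: rest) = c :: pvReplDbl rest := by
          cases rest with
          | nil =>
              cases hce : decide (c = ' ') <;> simp_all [pvReplDbl]
          | cons d r =>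
              by_cases h1 : c = ' ' ∧ d = ' '
              · exact absurd (hnot r h1.1 (by rw [h1.2])) (fun f => f)
              · rcases Decidable.not_and_iff_not_or_not.mp h1 with h2 | h2 <;>
                  simp [pvReplDbl, h2]
        rw [hc]
        simpa using ih hi
  | case3 => simp at h

-- `while argument.find(SPACE*2, 0, len(argument)) != -1: argument = argument.replace(SPACE*2, SPACE)`
def pvCollapse (s : List Char) : List Char :=
  if h : PySem.Chars.find s [' ', ' '] ≠ -1 then pvCollapse (pvReplDbl s)
  else s
termination_by s.length
decreasing_by
  exact pvReplDbl_length_lt s ((PySem.Chars.find_ne_neg_one_iff s [' ', ' ']).mp h)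

-- `c = 0; while c < len(argument): …` — index walk deleting class-matched spaces in place
def pvPhase3 (s : List Char) (c : Nat) : List Char :=
  if h : c < s.length then
    if s[c] = ' ' then
      if pvMatch (PySem.List.pyGet? s ((c : Int) - 1)) (PySem.List.pyGet? s ((c : Int) + 1)) then
        pvPhase3 (s.take c ++ s.drop (c + 1)) (c + 1)
      else pvPhase3 s (c + 1)
    else pvPhase3 s (c + 1)
  else s
termination_by s.length - c
decreasing_by
  · simp [List.length_take, List.length_drop]; omega
  · omega
  · omega

def RemoveSpaces (argument : String) : String :=
  String.mk (pvPhase3 (pvCollapse (pvStripR (pvStripL argument.toList))) 0)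

-- ===== PORT B =====
-- B's boundary-class test; `none` is where Python's indexing would raise (never reached: tokens are non-empty)
def pvBClassMatch : Option Char → Option Char → Bool
  | some a, some b =>
      ((a = '+' || a = '-') && (b = '+' || b = '-')) ||
      ((a = '*' || a = '/' || a = '^') && (b = '*' || b = '/' || b = '^'))
  | _, _ => false

-- hand port of str.split(' ') (single-character separator), exact
def pvSplit1 : List Char → List (List Char)
  | [] => [[]]
  | c :: r => if c = ' ' then [] :: pvSplit1 r
              else (c :: (pvSplit1 r).headI) :: (pvSplit1 r).tail

-- `[t for t in argument.split(' ') if t]`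
def pvToks (l : List Char) : List (List Char) := (pvSplit1 l).filter (· ≠ [])

-- loop body: append next token with no separator on a class match, else with one space
def pvStep (acc t : List Char) : List Char :=
  if pvBClassMatch (PySem.List.pyGet? acc (-1)) (PySem.List.pyGet? t 0) then acc ++ t
  else acc ++ ' ' :: t

def RemoveSpaces_alt (argument : String) : String :=
  match pvToks argument.toList with
  | [] => ""
  | t :: rest => String.mk (rest.foldl pvStep t)

-- ===== PRECONDITION & SPEC =====
-- Pre_ excludes exactly the inputs on which A raises IndexError: strings with no non-space character
def Pre_RemoveSpaces (argument : String) : Prop := argument.toList.any (· != ' ') = true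
instance (argument : String) : Decidable (Pre_RemoveSpaces argument) := by unfold Pre_RemoveSpaces; infer_instance
def pvWitness_RemoveSpaces : String := "1 +  + 2"

def Spec_RemoveSpaces (argument : String) (out : String) : Prop := out = RemoveSpaces_alt argument
instance (argument : String) (out : String) : Decidable (Spec_RemoveSpaces argument out) := by unfold Spec_RemoveSpaces; infer_instance

-- ===== CLAIM (what is proved, stated in full; the proofs are below) =====
def Claim_equal_RemoveSpaces : Prop := ∀ (argument : String), Dom_RemoveSpaces argument → Pre_RemoveSpaces argument → Spec_RemoveSpaces argument (RemoveSpaces argument)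

-- ===== LEMMAS AND PROOFS =====

-- --- proof-side helpers ---

-- pvTail ts = one space before each remaining token, concatenated
def pvTail (ts : List (List Char)) : List Char := (ts.map (' ' :: ·)).flatten

def pvJoin : List (List Char) → List Char
  | [] => []
  | t :: ts => t ++ pvTail ts

-- --- facts about pvSplit1 / pvToks ---

theorem pvSplit1_ne_nil (l : List Char) : pvSplit1 l ≠ [] := by
  cases l with
  | nil => simp [pvSplit1]
  | cons c r => by_cases hc : c = ' ' <;> simp [pvSplit1, hc]

theorem pvToks_cons_space (l : List Char) : pvToks (' ' :: l) = pvToks l := by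
  simp [pvToks, pvSplit1]

theorem pvSplit1_append_space (l m : List Char) :
    pvSplit1 (l ++ ' ' :: m) = pvSplit1 l ++ pvSplit1 m := by
  induction l with
  | nil => simp [pvSplit1]
  | cons c r ih =>
      by_cases hc : c = ' '
      · simp [pvSplit1, hc, ih]
      · have h1 := pvSplit1_ne_nil r
        simp [pvSplit1, hc, ih]
        cases hs : pvSplit1 r with
        | nil => exact absurd hs h1
        | cons t ts => simp

theorem pvToks_append_space (l m : List Char) :
    pvToks (l ++ ' ' :: m) = pvToks l ++ pvToks m := by
  simp [pvToks, pvSplit1_append_space, List.filter_append]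

theorem pvToks_append_space_nil (l : List Char) : pvToks (l ++ [' ']) = pvToks l := by
  rw [pvToks_append_space l []]; simp [pvToks, pvSplit1]

theorem pvSplit1_nospace (l : List Char) (h : ∀ c ∈ l, c ≠ ' ') : pvSplit1 l = [l] := by
  induction l with
  | nil => rfl
  | cons c r ih =>
      have hc : c ≠ ' ' := h c (by simp)
      have hr := ih (fun x hx => h x (by simp [hx]))
      simp [pvSplit1, hc, hr]

theorem pvToks_nospace (l : List Char) (hne : l ≠ []) (h : ∀ c ∈ l, c ≠ ' ') :
    pvToks l = [l] := by
  simp [pvToks, pvSplit1_nospace l h, hne]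

theorem pvSplit1_mem_nospace (l : List Char) : ∀ t ∈ pvSplit1 l, ∀ c ∈ t, c ≠ ' ' := by
  induction l with
  | nil => intro t ht; simp [pvSplit1] at ht; simp [ht]
  | cons c r ih =>
      intro t ht
      by_cases hc : c = ' '
      · simp [pvSplit1, hc] at ht
        rcases ht with ht | ht
        · simp [ht]
        · exact ih t ht
      · have h1 := pvSplit1_ne_nil r
        cases hs : pvSplit1 r with
        | nil => exact absurd hs h1
        | cons u us =>
            simp [pvSplit1, hc, hs] at ht
            rcases ht with ht | ht
            · subst ht
              intro x hx
              rcases List.mem_cons.mp hx with hx | hx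
              · subst hx; exact hc
              · exact ih u (by simp [hs]) x hx
            · exact ih t (by simp [hs, ht])

theorem pvToks_props (l : List Char) : ∀ t ∈ pvToks l, t ≠ [] ∧ ∀ c ∈ t, c ≠ ' ' := by
  intro t ht
  have h2 := List.mem_filter.mp ht
  refine ⟨by simpa using h2.2, pvSplit1_mem_nospace l t h2.1⟩

theorem pvToks_ne_nil (l : List Char) (h : l.any (· != ' ') = true) : pvToks l ≠ [] := by
  induction l with
  | nil => simp at h
  | cons c r ih =>
      by_cases hc : c = ' '
      · subst hc
        simp at h
        rw [pvToks_cons_space]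
        exact ih (by simpa using h)
      · have h1 := pvSplit1_ne_nil r
        cases hs : pvSplit1 r with
        | nil => exact absurd hs h1
        | cons u us => simp [pvToks, pvSplit1, hc, hs]

-- --- the strip phases preserve pvToks ---

theorem pvStripL_eq_dropWhile (l : List Char) : pvStripL l = l.dropWhile (· = ' ') := by
  induction l with
  | nil => rfl
  | cons c r ih => by_cases hc : c = ' ' <;> simp [pvStripL, hc, ih]

theorem pvToks_dropWhile (l : List Char) : pvToks (l.dropWhile (· = ' ')) = pvToks l := by
  induction l with
  | nil => rfl
  | cons c r ih =>
      by_cases hc : c = ' '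
      · rw [List.dropWhile_cons_of_pos (by simp [hc]), ih, hc, pvToks_cons_space]
      · rw [List.dropWhile_cons_of_neg (by simp [hc])]

theorem pvStripR_eq_rdrop (l : List Char) :
    pvStripR l = (l.reverse.dropWhile (· = ' ')).reverse := by
  induction l using List.reverseRecOn with
  | nil => rw [pvStripR]; simp [PySem.List.pyGet?]
  | append_singleton xs x ih =>
      by_cases hx : x = ' '
      · rw [pvStripR,
            dif_pos (by simp [PySem.List.pyGet?_neg_one_append_singleton, hx]),
            List.dropLast_concat, ih]
        simp [hx]
      · rw [pvStripR, dif_neg (by simp [PySem.List.pyGet?_neg_one_append_singleton, hx])]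
        simp [hx]

theorem pvToks_rdrop (l : List Char) :
    pvToks ((l.reverse.dropWhile (· = ' ')).reverse) = pvToks l := by
  induction l using List.reverseRecOn with
  | nil => rfl
  | append_singleton xs x ih =>
      by_cases hx : x = ' '
      · subst hx
        rw [List.reverse_append]
        simp only [List.reverse_singleton, List.singleton_append, List.dropWhile_cons]
        simp only [decide_true, if_true]
        rw [ih, ← pvToks_append_space_nil xs]
      · rw [List.reverse_append]
        simp [hx]

-- --- the collapse phase: pvReplDbl / pvCollapse facts ---

theorem pvReplDbl_cons_eq (c : Char) (rest : List Char)
    (hnot : ∀ r1, c = ' ' → rest = ' ' :: r1 → False) :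
    pvReplDbl (c :: rest) = c :: pvReplDbl rest := by
  cases rest with
  | nil => cases hce : decide (c = ' ') <;> simp_all [pvReplDbl]
  | cons d r =>
      by_cases h1 : c = ' ' ∧ d = ' '
      · exact absurd (hnot r h1.1 (by rw [h1.2])) (fun f => f)
      · rcases Decidable.not_and_iff_not_or_not.mp h1 with h2 | h2 <;> simp [pvReplDbl, h2]

theorem pvReplDbl_cons_cons_space (r : List Char) :
    pvReplDbl (' ' :: ' ' :: r) = ' ' :: pvReplDbl r := by simp [pvReplDbl]

theorem pvReplDbl_cons_nospace (c : Char) (r : List Char) (hc : c ≠ ' ') :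
    pvReplDbl (c :: r) = c :: pvReplDbl r :=
  pvReplDbl_cons_eq c r (fun _ h _ => hc h)

theorem pvReplDbl_cons_space_nospace (r : List Char) (hr : r.head? ≠ some ' ') :
    pvReplDbl (' ' :: r) = ' ' :: pvReplDbl r :=
  pvReplDbl_cons_eq ' ' r (fun r1 _ h2 => hr (by rw [h2]; rfl))

theorem pvReplDbl_append_nospace (t x : List Char) (h : ∀ c ∈ t, c ≠ ' ') :
    pvReplDbl (t ++ x) = t ++ pvReplDbl x := by
  induction t with
  | nil => rfl
  | cons c r ih =>
      rw [List.cons_append, pvReplDbl_cons_nospace c _ (h c (by simp)),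
          ih (fun y hy => h y (by simp [hy])), List.cons_append]

theorem pvReplDbl_toks_aux : ∀ n, ∀ l : List Char, l.length ≤ n →
    pvToks (pvReplDbl l) = pvToks l := by
  intro n
  induction n with
  | zero =>
      intro l hl
      have : l = [] := List.length_eq_zero_iff.mp (Nat.le_zero.mp hl)
      subst this; rfl
  | succ n ih =>
      intro l hl
      cases l with
      | nil => rfl
      | cons c r =>
          by_cases hc : c = ' '
          · subst hc
            cases r with
            | nil => decide
            | cons d r' =>
                by_cases hd : d = ' '
                · subst hd
                  rw [pvReplDbl_cons_cons_space, pvToks_cons_space, pvToks_cons_space,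
                      pvToks_cons_space]
                  exact ih r' (by simp at hl; omega)
                · rw [pvReplDbl_cons_space_nospace _ (by simp [hd]), pvToks_cons_space,
                      pvToks_cons_space]
                  exact ih (d :: r') (by simp at hl ⊢; omega)
          · have hsplit : c :: r = (c :: r.takeWhile (· ≠ ' ')) ++ r.dropWhile (· ≠ ' ') := by
              simp [List.takeWhile_append_dropWhile]
            have ht : ∀ x ∈ c :: r.takeWhile (· ≠ ' '), x ≠ ' ' := by
              intro x hx
              rcases List.mem_cons.mp hx with hx | hx
              · subst hx; exact hc
              · simpa using List.mem_takeWhile_imp hx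
            cases hrest : r.dropWhile (· ≠ ' ') with
            | nil =>
                rw [hsplit, hrest]
                rw [pvReplDbl_append_nospace _ _ ht]
                rfl
            | cons d r2 =>
                have hd : d = ' ' := by
                  have hw : List.dropWhile (fun x => decide (x ≠ ' ')) r ≠ [] := by
                    rw [hrest]; simp
                  have hh := List.head_dropWhile_not (fun x => decide (x ≠ ' ')) (l := r) hw
                  simp only [hrest] at hh
                  simpa using hh
                subst hd
                rw [hsplit, hrest, pvReplDbl_append_nospace _ _ ht]
                have hlen : (c :: r.takeWhile (· ≠ ' ')).length + (' ' :: r2).length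
                    = (c :: r).length := by
                  rw [← List.length_append, ← hrest, ← hsplit]
                cases r2 with
                | nil => rfl
                | cons e r3 =>
                    by_cases he : e = ' '
                    · subst he
                      rw [pvReplDbl_cons_cons_space]
                      simp only [pvToks_append_space, pvToks_cons_space]
                      have : r3.length ≤ n := by simp at hlen hl; omega
                      rw [ih r3 this]
                    · rw [pvReplDbl_cons_space_nospace _ (by simp [he])]
                      simp only [pvToks_append_space]
                      have : (e :: r3).length ≤ n := by simp at hlen hl ⊢; omega
                      rw [ih (e :: r3) this]

theorem pvReplDbl_toks (l : List Char) : pvToks (pvReplDbl l) = pvToks l :=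
  pvReplDbl_toks_aux l.length l le_rfl

theorem pvReplDbl_nil_iff (l : List Char) : pvReplDbl l = [] ↔ l = [] := by
  induction l using pvReplDbl.induct with
  | case1 r ih => rw [pvReplDbl_cons_cons_space]; simp
  | case2 c rest hnot ih => rw [pvReplDbl_cons_eq c rest hnot]; simp
  | case3 => simp [pvReplDbl]

theorem pvReplDbl_head? (l : List Char) : (pvReplDbl l).head? = l.head? := by
  induction l using pvReplDbl.induct with
  | case1 r ih => rw [pvReplDbl_cons_cons_space]; rfl
  | case2 c rest hnot ih => rw [pvReplDbl_cons_eq c rest hnot]; rfl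
  | case3 => rfl

theorem pvGetLast?_cons_ne (a : Char) (l : List Char) (h : l ≠ []) :
    (a :: l).getLast? = l.getLast? := by
  cases hl : l.getLast? with
  | none => exact absurd (List.getLast?_eq_none_iff.mp hl) h
  | some b =>
      have := List.getLast?_append (l := [a]) (l' := l)
      simpa [hl] using this

theorem pvReplDbl_getLast? (l : List Char) : (pvReplDbl l).getLast? = l.getLast? := by
  induction l using pvReplDbl.induct with
  | case1 r ih =>
      rw [pvReplDbl_cons_cons_space]
      by_cases hr : r = []
      · subst hr; simp [pvReplDbl]
      · have hrn : pvReplDbl r ≠ [] := fun h => hr ((pvReplDbl_nil_iff r).mp h)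
        rw [pvGetLast?_cons_ne _ _ hrn, ih, pvGetLast?_cons_ne _ _ (by simp),
            pvGetLast?_cons_ne _ _ hr]
  | case2 c rest hnot ih =>
      rw [pvReplDbl_cons_eq c rest hnot]
      by_cases hr : rest = []
      · subst hr; simp [pvReplDbl]
      · rw [pvGetLast?_cons_ne _ _ (fun h => hr ((pvReplDbl_nil_iff rest).mp h)), ih,
            pvGetLast?_cons_ne _ _ hr]
  | case3 => rfl

-- --- pvCollapse: unfolding equations and invariants ---

theorem pvCollapse_eq_of_none (l : List Char) (h : ¬ [' ', ' '] <:+: l) : pvCollapse l = l := by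
  rw [pvCollapse,
      dif_neg (by simpa using (PySem.Chars.find_eq_neg_one_iff l [' ', ' ']).mpr h)]

theorem pvCollapse_step (l : List Char) (h : [' ', ' '] <:+: l) :
    pvCollapse l = pvCollapse (pvReplDbl l) := by
  conv_lhs => rw [pvCollapse]
  rw [dif_pos (by simpa using (PySem.Chars.find_ne_neg_one_iff l [' ', ' ']).mpr h)]

theorem pvCollapse_toks_aux : ∀ n, ∀ l : List Char, l.length ≤ n →
    pvToks (pvCollapse l) = pvToks l := by
  intro n
  induction n with
  | zero =>
      intro l hl
      have : l = [] := List.length_eq_zero_iff.mp (Nat.le_zero.mp hl)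
      subst this
      rw [pvCollapse_eq_of_none [] (by simp)]
  | succ n ih =>
      intro l hl
      by_cases h : [' ', ' '] <:+: l
      · have hlt := pvReplDbl_length_lt l h
        rw [pvCollapse_step l h, ih (pvReplDbl l) (by omega), pvReplDbl_toks]
      · rw [pvCollapse_eq_of_none l h]

theorem pvCollapse_toks (l : List Char) : pvToks (pvCollapse l) = pvToks l :=
  pvCollapse_toks_aux l.length l le_rfl

theorem pvCollapse_noDbl_aux : ∀ n, ∀ l : List Char, l.length ≤ n →
    ¬ [' ', ' '] <:+: pvCollapse l := by
  intro n
  induction n with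
  | zero =>
      intro l hl
      have : l = [] := List.length_eq_zero_iff.mp (Nat.le_zero.mp hl)
      subst this
      rw [pvCollapse_eq_of_none [] (by simp)]
      simp
  | succ n ih =>
      intro l hl
      by_cases h : [' ', ' '] <:+: l
      · have hlt := pvReplDbl_length_lt l h
        rw [pvCollapse_step l h]
        exact ih (pvReplDbl l) (by omega)
      · rw [pvCollapse_eq_of_none l h]
        exact h

theorem pvCollapse_noDbl (l : List Char) : ¬ [' ', ' '] <:+: pvCollapse l :=
  pvCollapse_noDbl_aux l.length l le_rfl

theorem pvCollapse_head?_aux : ∀ n, ∀ l : List Char, l.length ≤ n →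
    (pvCollapse l).head? = l.head? := by
  intro n
  induction n with
  | zero =>
      intro l hl
      have : l = [] := List.length_eq_zero_iff.mp (Nat.le_zero.mp hl)
      subst this
      rw [pvCollapse_eq_of_none [] (by simp)]
  | succ n ih =>
      intro l hl
      by_cases h : [' ', ' '] <:+: l
      · have hlt := pvReplDbl_length_lt l h
        rw [pvCollapse_step l h, ih (pvReplDbl l) (by omega), pvReplDbl_head?]
      · rw [pvCollapse_eq_of_none l h]

theorem pvCollapse_head? (l : List Char) : (pvCollapse l).head? = l.head? :=
  pvCollapse_head?_aux l.length l le_rfl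

theorem pvCollapse_getLast?_aux : ∀ n, ∀ l : List Char, l.length ≤ n →
    (pvCollapse l).getLast? = l.getLast? := by
  intro n
  induction n with
  | zero =>
      intro l hl
      have : l = [] := List.length_eq_zero_iff.mp (Nat.le_zero.mp hl)
      subst this
      rw [pvCollapse_eq_of_none [] (by simp)]
  | succ n ih =>
      intro l hl
      by_cases h : [' ', ' '] <:+: l
      · have hlt := pvReplDbl_length_lt l h
        rw [pvCollapse_step l h, ih (pvReplDbl l) (by omega), pvReplDbl_getLast?]
      · rw [pvCollapse_eq_of_none l h]

theorem pvCollapse_getLast? (l : List Char) : (pvCollapse l).getLast? = l.getLast? :=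
  pvCollapse_getLast?_aux l.length l le_rfl

-- --- the canonical form: a string with no leading/trailing/double space is the join of its tokens ---

theorem pvTail_cons (t : List Char) (ts : List (List Char)) :
    pvTail (t :: ts) = ' ' :: (t ++ pvTail ts) := by simp [pvTail]

theorem pvTail_of_ne (ts : List (List Char)) (h : ts ≠ []) :
    pvTail ts = ' ' :: pvJoin ts := by
  cases ts with
  | nil => exact absurd rfl h
  | cons t ts => rw [pvTail_cons]; rfl

theorem pvHead?_dropWhile (l : List Char) :
    (l.dropWhile (· = ' ')).head? ≠ some ' ' := by
  cases hd : l.dropWhile (· = ' ') with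
  | nil => simp
  | cons d r =>
      have hw : l.dropWhile (· = ' ') ≠ [] := by rw [hd]; simp
      have hh := List.head_dropWhile_not (fun x => decide (x = ' ')) (l := l) hw
      simp only [hd] at hh
      simpa using hh

theorem pvJoin_toks_canonical_aux : ∀ n, ∀ s : List Char, s.length ≤ n →
    s.head? ≠ some ' ' → s.getLast? ≠ some ' ' → ¬ [' ', ' '] <:+: s →
    pvJoin (pvToks s) = s := by
  intro n
  induction n with
  | zero =>
      intro s hl _ _ _
      have : s = [] := List.length_eq_zero_iff.mp (Nat.le_zero.mp hl)
      subst this; rfl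
  | succ n ih =>
      intro s hl hhd hlast2 hnd
      cases s with
      | nil => rfl
      | cons c r =>
          have hc : c ≠ ' ' := fun h => hhd (by simp [h])
          have hsplit : c :: r = (c :: r.takeWhile (· ≠ ' ')) ++ r.dropWhile (· ≠ ' ') := by
            simp [List.takeWhile_append_dropWhile]
          have ht : ∀ x ∈ c :: r.takeWhile (· ≠ ' '), x ≠ ' ' := by
            intro x hx
            rcases List.mem_cons.mp hx with hx | hx
            · subst hx; exact hc
            · simpa using List.mem_takeWhile_imp hx
          cases hrest : r.dropWhile (· ≠ ' ') with
          | nil =>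
              rw [hsplit, hrest, List.append_nil,
                  pvToks_nospace _ (by simp) ht]
              simp [pvJoin, pvTail]
          | cons d r2 =>
              have hd : d = ' ' := by
                have hw : List.dropWhile (fun x => decide (x ≠ ' ')) r ≠ [] := by
                  rw [hrest]; simp
                have hh := List.head_dropWhile_not (fun x => decide (x ≠ ' ')) (l := r) hw
                simp only [hrest] at hh
                simpa using hh
              subst hd
              have hs : c :: r = (c :: r.takeWhile (· ≠ ' ')) ++ ' ' :: r2 := by
                rw [hsplit, hrest]
              have hr2ne : r2 ≠ [] := by
                intro h2
                subst h2
                apply hlast2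
                rw [hs, List.getLast?_concat]
              have hr2hd : r2.head? ≠ some ' ' := by
                cases hr2 : r2 with
                | nil => simp
                | cons e r3 =>
                    intro he
                    simp at he
                    apply hnd
                    refine ⟨c :: r.takeWhile (· ≠ ' '), r3, ?_⟩
                    rw [hs, hr2, he]
                    simp
              have hr2last : r2.getLast? ≠ some ' ' := by
                intro h2
                apply hlast2
                rw [hs, List.getLast?_append, pvGetLast?_cons_ne _ _ hr2ne, h2]
                rfl
              have hr2nd : ¬ [' ', ' '] <:+: r2 := by
                intro h2
                exact hnd (h2.trans ⟨(c :: r.takeWhile (· ≠ ' ')) ++ [' '], [], by simp [hs]⟩)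
              have hr2len : r2.length ≤ n := by
                have := congrArg List.length hs
                simp at this hl
                omega
              have hIH := ih r2 hr2len hr2hd hr2last hr2nd
              have htoksne : pvToks r2 ≠ [] := by
                cases hr2 : r2 with
                | nil => exact absurd hr2 hr2ne
                | cons e r3 =>
                    apply pvToks_ne_nil
                    have he : e ≠ ' ' := fun h => hr2hd (by simp [hr2, h])
                    simp [he]
              rw [hs, pvToks_append_space, pvToks_nospace _ (by simp) ht]
              show pvJoin ((c :: r.takeWhile (· ≠ ' ')) :: pvToks r2) = _
              show (c :: r.takeWhile (· ≠ ' ')) ++ pvTail (pvToks r2) = _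
              rw [pvTail_of_ne _ htoksne, hIH]

theorem pvJoin_toks_canonical (s : List Char) (hhd : s.head? ≠ some ' ')
    (hlast : s.getLast? ≠ some ' ') (hnd : ¬ [' ', ' '] <:+: s) :
    pvJoin (pvToks s) = s :=
  pvJoin_toks_canonical_aux s.length s le_rfl hhd hlast hnd

-- --- the index walk of A's third phase versus B's fold over the token gaps ---

theorem pvBClassMatch_eq (a b : Option Char) : pvBClassMatch a b = pvMatch a b := by
  cases a <;> cases b <;> rfl

theorem pvPhase3_ge (s : List Char) (c : Nat) (h : s.length ≤ c) : pvPhase3 s c = s := by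
  rw [pvPhase3, dif_neg (by omega)]

theorem pvPhase3_skip : ∀ (k c : Nat) (s : List Char),
    (∀ i, i < k → s[c + i]? ≠ some ' ') → pvPhase3 s c = pvPhase3 s (c + k) := by
  intro k
  induction k with
  | zero => intro c s _; rfl
  | succ k ih =>
      intro c s h
      by_cases hc : c < s.length
      · have h0 : ¬ s[c] = ' ' := by
          intro he
          have h1 := h 0 (by omega)
          apply h1
          rw [Nat.add_zero, List.getElem?_eq_getElem hc, he]
        conv_lhs => rw [pvPhase3]
        rw [dif_pos hc, if_neg h0]
        have h2 := ih (c + 1) s (fun i hi => by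
          have := h (i + 1) (by omega)
          rwa [show c + (i + 1) = c + 1 + i by omega] at this)
        rw [h2, show c + 1 + k = c + (k + 1) by omega]
      · rw [pvPhase3_ge s c (by omega), pvPhase3_ge s _ (by omega)]

theorem pvPhase3_glue : ∀ (ts : List (List Char)) (acc : List Char), acc ≠ [] →
    (∀ t ∈ ts, t ≠ [] ∧ ∀ c ∈ t, c ≠ ' ') →
    pvPhase3 (acc ++ pvTail ts) acc.length = ts.foldl pvStep acc := by
  intro ts
  induction ts with
  | nil =>
      intro acc _ _
      simp only [pvTail, List.map_nil, List.flatten_nil, List.append_nil, List.foldl_nil]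
      exact pvPhase3_ge acc acc.length le_rfl
  | cons t ts ih =>
      intro acc ha hp
      obtain ⟨htne, htsp⟩ := hp t (by simp)
      have hps : ∀ u ∈ ts, u ≠ [] ∧ ∀ c ∈ u, c ≠ ' ' := fun u hu => hp u (by simp [hu])
      cases htt : t with
      | nil => exact absurd htt htne
      | cons u t' =>
      subst htt
      rw [pvTail_cons]
      set s := acc ++ ' ' :: (u :: t' ++ pvTail ts) with hsdef
      have hacc1 : 1 ≤ acc.length := by
        cases acc with
        | nil => exact absurd rfl ha
        | cons _ _ => simp
      have hclen : acc.length < s.length := by simp [hsdef]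
      have hsc? : s[acc.length]? = some ' ' := by
        rw [hsdef, List.getElem?_append_right le_rfl, Nat.sub_self]
        rfl
      have hsc : s[acc.length]'hclen = ' ' := by
        have := List.getElem?_eq_getElem hclen
        rw [hsc?] at this
        exact (Option.some_injective _ this).symm
      have hprev : PySem.List.pyGet? s ((acc.length : Int) - 1) = acc.getLast? := by
        rw [show ((acc.length : Int) - 1) = ((acc.length - 1 : Nat) : Int) by push_cast [hacc1]; omega,
            PySem.List.pyGet?_natCast, hsdef,
            List.getElem?_append_left (by omega), List.getLast?_eq_getElem?]
      have hnext : PySem.List.pyGet? s ((acc.length : Int) + 1) = some u := by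
        rw [show ((acc.length : Int) + 1) = ((acc.length + 1 : Nat) : Int) by push_cast; omega,
            PySem.List.pyGet?_natCast, hsdef,
            List.getElem?_append_right (by omega)]
        simp
      have hstep : pvStep acc (u :: t')
          = if pvMatch acc.getLast? (some u) then acc ++ u :: t' else acc ++ ' ' :: u :: t' := by
        rw [pvStep, pvBClassMatch_eq, PySem.List.pyGet?_neg_one, PySem.List.pyGet?_zero]
        rfl
      conv_lhs => rw [pvPhase3]
      rw [dif_pos hclen, if_pos hsc, hprev, hnext]
      by_cases hm : pvMatch acc.getLast? (some u) = true
      · rw [if_pos hm]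
        have htake : s.take acc.length = acc := by
          rw [hsdef]; exact List.take_left
        have hdrop : s.drop (acc.length + 1) = u :: t' ++ pvTail ts := by
          rw [show s = (acc ++ [' ']) ++ (u :: t' ++ pvTail ts) by simp [hsdef],
              List.drop_left' (by simp)]
        rw [htake, hdrop]
        have hassoc : acc ++ (u :: t' ++ pvTail ts) = (acc ++ u :: t') ++ pvTail ts := by
          simp
        rw [hassoc]
        have hskip := pvPhase3_skip t'.length (acc.length + 1) ((acc ++ u :: t') ++ pvTail ts)
          (by
            intro i hi
            rw [List.getElem?_append_left (by simp; omega),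
                show acc.length + 1 + i = acc.length + (1 + i) by omega,
                List.getElem?_append_right (by omega)]
            have hlt : 1 + i - acc.length + acc.length - acc.length < (u :: t').length := by
              simp; omega
            rw [show acc.length + (1 + i) - acc.length = 1 + i by omega,
                List.getElem?_eq_getElem (by simp; omega)]
            intro hcon
            exact htsp _ (List.getElem_mem _) (Option.some_injective _ hcon))
        rw [hskip, show acc.length + 1 + t'.length = (acc ++ u :: t').length by simp; omega]
        rw [ih (acc ++ u :: t') (by simp) hps]
        rw [List.foldl_cons, hstep, if_pos hm]
      · rw [if_neg hm]
        have hassoc : s = (acc ++ ' ' :: u :: t') ++ pvTail ts := by simp [hsdef]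
        have hskip := pvPhase3_skip (t'.length + 1) (acc.length + 1) s
          (by
            intro i hi
            rw [hassoc, List.getElem?_append_left (by simp; omega),
                show acc.length + 1 + i = acc.length + (1 + i) by omega,
                List.getElem?_append_right (by omega),
                show acc.length + (1 + i) - acc.length = i + 1 by omega,
                List.getElem?_cons_succ,
                List.getElem?_eq_getElem (by simp; omega)]
            intro hcon
            exact htsp _ (List.getElem_mem _) (Option.some_injective _ hcon))
        rw [hskip, show acc.length + 1 + (t'.length + 1) = (acc ++ ' ' :: u :: t').length
              by simp; omega,
            hassoc, ih (acc ++ ' ' :: u :: t') (by simp) hps,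
            List.foldl_cons, hstep, if_neg hm]

-- ===== VERDICT (by name: the statement is the Claim_ definition above) =====
theorem RemoveSpaces_spec : Claim_equal_RemoveSpaces := by
  unfold Claim_equal_RemoveSpaces
  intro arg _ hpre
  unfold Pre_RemoveSpaces at hpre
  unfold Spec_RemoveSpaces RemoveSpaces RemoveSpaces_alt
  set l := arg.toList with hldef
  set x := pvStripL l with hxdef
  set y := pvStripR x with hydef
  set u := pvCollapse y with hudef
  have hhd1 : x.head? ≠ some ' ' := by
    rw [hxdef, pvStripL_eq_dropWhile]; exact pvHead?_dropWhile l
  have hrd : y = (x.reverse.dropWhile (· = ' ')).reverse := pvStripR_eq_rdrop x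
  have hpfx : y <+: x := by
    rw [hrd]
    have := List.reverse_prefix.mpr (List.dropWhile_suffix (l := x.reverse) (· = ' '))
    simpa using this
  have hhd2 : y.head? ≠ some ' ' := by
    obtain ⟨rest, hre⟩ := hpfx
    cases hy : y with
    | nil => simp
    | cons a z =>
        intro hcon
        simp at hcon
        apply hhd1
        rw [← hre, hy, hcon]
        rfl
  have hlast2 : y.getLast? ≠ some ' ' := by
    rw [hrd, List.getLast?_reverse]
    exact pvHead?_dropWhile x.reverse
  have hhd3 : u.head? ≠ some ' ' := by rw [hudef, pvCollapse_head?]; exact hhd2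
  have hlast3 : u.getLast? ≠ some ' ' := by rw [hudef, pvCollapse_getLast?]; exact hlast2
  have hnd : ¬ [' ', ' '] <:+: u := pvCollapse_noDbl y
  have htoksu : pvToks u = pvToks l := by
    calc pvToks u = pvToks y := pvCollapse_toks y
      _ = pvToks x := by rw [hrd]; exact pvToks_rdrop x
      _ = pvToks l := by rw [hxdef, pvStripL_eq_dropWhile]; exact pvToks_dropWhile l
  have hJ : pvJoin (pvToks u) = u := pvJoin_toks_canonical u hhd3 hlast3 hnd
  have hne := pvToks_ne_nil l hpre
  cases hts : pvToks l with
  | nil => exact absurd hts hne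
  | cons t ts =>
      have hprops : ∀ v ∈ t :: ts, v ≠ [] ∧ ∀ c ∈ v, c ≠ ' ' := by
        rw [← hts]; exact pvToks_props l
      have htne : t ≠ [] := (hprops t (by simp)).1
      have htsp := (hprops t (by simp)).2
      have hpts : ∀ v ∈ ts, v ≠ [] ∧ ∀ c ∈ v, c ≠ ' ' := fun v hv => hprops v (by simp [hv])
      have hu : u = t ++ pvTail ts := by rw [← hJ, htoksu, hts]; rfl
      show String.mk (pvPhase3 u 0) = String.mk (ts.foldl pvStep t)
      refine congrArg String.mk ?_
      have hskip := pvPhase3_skip t.length 0 (t ++ pvTail ts) (by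
        intro i hi
        rw [Nat.zero_add, List.getElem?_append_left hi, List.getElem?_eq_getElem hi]
        intro hcon
        exact htsp _ (List.getElem_mem _) (Option.some_injective _ hcon))
      rw [hu, hskip, Nat.zero_add]
      exact pvPhase3_glue ts t htne hpts
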